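-- pv_equiv track=rewrite | github.com/fkie-cad/FACT_core | src/test/yara_signature_testing.py | _split_rules
-- ===== SOURCE A (Python) =====
-- from typing import List
--
-- def _split_rules(raw_rules: str) -> List[str]:
--     rule_lines = raw_rules.splitlines()
--     rule_start_indices = [
--         i
--         for i in range(len(rule_lines))
--         if rule_lines[i].startswith('rule ')
--     ]
--     rules = [
--         ''.join(rule_lines[start:end])
--         for start, end in zip(rule_start_indices, rule_start_indices[1:] + [len(rule_lines)])
--     ]
--     return rules
-- ===== SOURCE B (Python) =====
-- from typing import List
--
-- def _split_rules(raw_rules: str) -> List[str]: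
--     rules: List[str] = []
--     current = None
--     for line in raw_rules.splitlines():
--         if line.startswith('rule '):
--             if current is not None:
--                 rules.append(''.join(current))
--             current = [line]
--         elif current is not None:
--             current.append(line)
--     if current is not None:
--         rules.append(''.join(current))
--     return rules
-- ===== Notes on version B (the rewrite author's own statement) =====
-- stated objective: alternative
-- what changed: Replaced A's build-a-list-of-rule-start-indices, zip-with-shifted-indices and join-of-slices construction by a single pass over the lines that maintains an accumulator for the group being built, flushing it whenever a line starting a new rule is seen and once at the end.
import Mathlib
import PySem

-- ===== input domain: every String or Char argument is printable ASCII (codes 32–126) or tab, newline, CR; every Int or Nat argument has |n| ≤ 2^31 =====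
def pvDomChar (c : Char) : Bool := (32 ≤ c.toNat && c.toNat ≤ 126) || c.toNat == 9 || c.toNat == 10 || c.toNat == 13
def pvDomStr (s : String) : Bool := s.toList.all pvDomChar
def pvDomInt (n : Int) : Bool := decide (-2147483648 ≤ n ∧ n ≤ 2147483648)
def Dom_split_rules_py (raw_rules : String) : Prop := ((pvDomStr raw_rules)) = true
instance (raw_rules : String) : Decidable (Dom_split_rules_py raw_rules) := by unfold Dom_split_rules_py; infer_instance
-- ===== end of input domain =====

-- B replaces A's index-list/zip/slice construction by one pass over the lines with an
-- accumulator holding the group being built (objective: alternative decomposition, same cost).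

-- ===== PORT A =====
def split_rules_py (raw_rules : String) : List String :=
  let rule_lines := PySem.Str.splitlines raw_rules
  let rule_start_indices :=
    (PySem.List.pyRange 0 (PySem.List.len rule_lines) 1).filter
      (fun i => PySem.Str.startswith (PySem.List.pyGetD rule_lines i "") "rule ")
  (rule_start_indices.zip
      (PySem.List.slice rule_start_indices (some 1) none ++ [PySem.List.len rule_lines])).map
    (fun p => PySem.Str.join "" (PySem.List.slice rule_lines (some p.1) (some p.2)))

-- ===== PORT B =====
-- loop body of B's single pass: state = (rules so far, current group or none)
def pvStepB (st : List String × Option (List String)) (line : String) :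
    List String × Option (List String) :=
  if PySem.Str.startswith line "rule " then
    match st.2 with
    | some cur => (st.1 ++ [PySem.Str.join "" cur], some [line])
    | none => (st.1, some [line])
  else
    match st.2 with
    | some cur => (st.1, some (cur ++ [line]))
    | none => (st.1, none)

def split_rules_py_alt (raw_rules : String) : List String :=
  let st := (PySem.Str.splitlines raw_rules).foldl pvStepB ([], none)
  match st.2 with
  | some cur => st.1 ++ [PySem.Str.join "" cur]
  | none => st.1

-- ===== PRECONDITION & SPEC =====
def Spec_split_rules_py (raw_rules : String) (out : List String) : Prop := out = split_rules_py_alt raw_rules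
instance (raw_rules : String) (out : List String) : Decidable (Spec_split_rules_py raw_rules out) := by unfold Spec_split_rules_py; infer_instance

-- ===== CLAIM (what is proved, stated in full; the proofs are below) =====
def Claim_equal_split_rules_py : Prop := ∀ (raw_rules : String), Dom_split_rules_py raw_rules → Spec_split_rules_py raw_rules (split_rules_py raw_rules)

-- ===== LEMMAS AND PROOFS =====

def pvIsRule (l : String) : Bool := PySem.Str.startswith l "rule "

-- the line groups both programs produce, as lists of lines
def pvGroups : List String → List (List String)
  | [] => []
  | l :: ls =>
    if pvIsRule l then
      (l :: ls.takeWhile (fun x => !pvIsRule x)) :: pvGroups (ls.dropWhile (fun x => !pvIsRule x))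
    else pvGroups ls
termination_by ls => ls.length
decreasing_by
  · exact Nat.lt_succ_of_le (List.length_dropWhile_le _ _)
  · exact Nat.lt_succ_self _

-- Nat-level index list of A
def pvIdxs (ls : List String) : List Nat :=
  (List.range ls.length).filter (fun k => pvIsRule (ls.getD k ""))

lemma pvIdxs_cons (l : String) (ls : List String) :
    pvIdxs (l :: ls) = (if pvIsRule l then [0] else []) ++ (pvIdxs ls).map (· + 1) := by
  have h : (List.filter (fun k => pvIsRule ((l :: ls).getD k "")) (List.map Nat.succ (List.range ls.length)))
      = (List.filter (fun k => pvIsRule (ls.getD k "")) (List.range ls.length)).map (· + 1) := by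
    rw [List.filter_map]
    congr 1
  unfold pvIdxs
  rw [List.length_cons, List.range_succ_eq_map, List.filter_cons, h]
  cases hl : pvIsRule l
  · rw [if_neg (by simp [hl]), if_neg (by simp), List.nil_append]
  · rw [if_pos (by simp [hl]), if_pos (by simp), List.singleton_append]

lemma pvGroups_dropWhile (ls : List String) :
    pvGroups (ls.dropWhile (fun x => !pvIsRule x)) = pvGroups ls := by
  induction ls with
  | nil => rfl
  | cons l ls ih =>
    by_cases hl : pvIsRule l = true
    · rw [List.dropWhile_cons_of_neg (by simp [hl])]
    · rw [List.dropWhile_cons_of_pos (by simp [hl]), ih, pvGroups]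
      simp [hl]

lemma pvTake_headIdx (ls : List String) :
    ls.take ((pvIdxs ls).headD ls.length) = ls.takeWhile (fun x => !pvIsRule x) := by
  induction ls with
  | nil => rfl
  | cons l ls ih =>
    rw [pvIdxs_cons]
    by_cases hl : pvIsRule l = true
    · simp [hl]
    · rw [if_neg hl, List.nil_append]
      have hhead : ((pvIdxs ls).map (· + 1)).headD (l :: ls).length = (pvIdxs ls).headD ls.length + 1 := by
        cases pvIdxs ls <;> simp
      rw [hhead, List.take_succ_cons, ih, List.takeWhile_cons]
      simp [hl]

-- A's zip-of-slices over Nat indices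
def pvA (ls : List String) : List String :=
  ((pvIdxs ls).zip ((pvIdxs ls).tail ++ [ls.length])).map
    (fun p => PySem.Str.join "" ((ls.drop p.1).take (p.2 - p.1)))

lemma pvA_eq_groups (ls : List String) :
    pvA ls = (pvGroups ls).map (PySem.Str.join "") := by
  induction ls with
  | nil => simp [pvA, pvGroups, pvIdxs]
  | cons l ls ih =>
    unfold pvA at ih ⊢
    rw [pvIdxs_cons]
    have hshift :
          (((pvIdxs ls).map (· + 1)).zip (((pvIdxs ls).map (· + 1)).tail ++ [ls.length + 1])).map
            (fun p => PySem.Str.join "" (((l :: ls).drop p.1).take (p.2 - p.1)))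
          = ((pvIdxs ls).zip ((pvIdxs ls).tail ++ [ls.length])).map
            (fun p => PySem.Str.join "" ((ls.drop p.1).take (p.2 - p.1))) := by
      rw [← List.map_tail, show ((pvIdxs ls).tail.map (· + 1) ++ [ls.length + 1])
            = ((pvIdxs ls).tail ++ [ls.length]).map (· + 1) by simp,
          List.zip_map, List.map_map]
      apply List.map_congr_left
      intro p _
      simp [Prod.map]
    by_cases hl : pvIsRule l = true
    · simp only [hl, if_true, List.singleton_append, List.length_cons]
      have hzip : ∀ (m : List Nat) (n : Nat),
          (0 :: m).zip (m ++ [n]) = (0, (m ++ [n]).headD 0) :: m.zip (m.tail ++ [n]) := by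
        intro m n; cases m <;> rfl
      rw [List.tail_cons, hzip]
      have hhead : (((pvIdxs ls).map (· + 1)) ++ [ls.length + 1]).headD 0
          = (pvIdxs ls).headD ls.length + 1 := by
        cases pvIdxs ls <;> simp
      rw [List.map_cons, hshift, ih, pvGroups]
      simp only [hl, if_true, List.map_cons]
      congr 1
      · rw [hhead]
        simp only [Nat.sub_zero, List.drop_zero, List.take_succ_cons, pvTake_headIdx]
      · rw [pvGroups_dropWhile]
    · rw [if_neg hl, List.nil_append, List.length_cons, hshift, ih, pvGroups]
      simp [hl]

-- B's loop with a live current group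
lemma pvB_loop_some (ls : List String) (res cur : List String) :
    (match (ls.foldl pvStepB (res, some cur)).2 with
      | some c => (ls.foldl pvStepB (res, some cur)).1 ++ [PySem.Str.join "" c]
      | none => (ls.foldl pvStepB (res, some cur)).1)
    = res ++ [PySem.Str.join "" (cur ++ ls.takeWhile (fun x => !pvIsRule x))]
        ++ (pvGroups (ls.dropWhile (fun x => !pvIsRule x))).map (PySem.Str.join "") := by
  induction ls generalizing res cur with
  | nil => simp [pvGroups]
  | cons l ls ih =>
    by_cases hl : pvIsRule l = true
    · have hstep : pvStepB (res, some cur) l = (res ++ [PySem.Str.join "" cur], some [l]) := by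
        simp [pvStepB, pvIsRule] at hl ⊢; simp [hl]
      rw [List.foldl_cons, hstep, ih,
          List.takeWhile_cons_of_neg (by simp [hl]), List.dropWhile_cons_of_neg (by simp [hl]),
          pvGroups]
      simp [hl]
    · have hstep : pvStepB (res, some cur) l = (res, some (cur ++ [l])) := by
        simp [pvStepB, pvIsRule] at hl ⊢; simp [hl]
      rw [List.foldl_cons, hstep, ih,
          List.takeWhile_cons_of_pos (by simp [hl]), List.dropWhile_cons_of_pos (by simp [hl])]
      simp

lemma pvB_loop_none (ls : List String) (res : List String) :
    (match (ls.foldl pvStepB (res, none)).2 with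
      | some c => (ls.foldl pvStepB (res, none)).1 ++ [PySem.Str.join "" c]
      | none => (ls.foldl pvStepB (res, none)).1)
    = res ++ (pvGroups ls).map (PySem.Str.join "") := by
  induction ls generalizing res with
  | nil => simp [pvGroups]
  | cons l ls ih =>
    by_cases hl : pvIsRule l = true
    · have hstep : pvStepB (res, none) l = (res, some [l]) := by
        simp [pvStepB, pvIsRule] at hl ⊢; simp [hl]
      rw [List.foldl_cons, hstep, pvB_loop_some, pvGroups]
      simp [hl]
    · have hstep : pvStepB (res, none) l = (res, none) := by
        simp [pvStepB, pvIsRule] at hl ⊢; simp [hl]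
      rw [List.foldl_cons, hstep, ih, pvGroups]
      simp [hl]

lemma pvA_bridge (ls : List String) : 
    ((List.filter (fun i => PySem.Str.startswith (PySem.List.pyGetD ls i "") "rule ")
        (PySem.List.pyRange 0 (PySem.List.len ls) 1)).zip
      (PySem.List.slice (List.filter (fun i => PySem.Str.startswith (PySem.List.pyGetD ls i "") "rule ")
        (PySem.List.pyRange 0 (PySem.List.len ls) 1)) (some 1) none ++ [PySem.List.len ls])).map
      (fun p => PySem.Str.join "" (PySem.List.slice ls (some p.1) (some p.2)))
    = pvA ls := by
  have hrange : PySem.List.pyRange 0 (PySem.List.len ls) 1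
      = (List.range ls.length).map (fun k : Nat => (k : Int)) := by
    rw [PySem.List.len_eq, PySem.List.pyRange_one]
    simp only [sub_zero, Int.toNat_natCast]
    exact List.map_congr_left (fun k _ => by rw [zero_add])
  have hfilter : (List.filter (fun i => PySem.Str.startswith (PySem.List.pyGetD ls i "") "rule ")
        (PySem.List.pyRange 0 (PySem.List.len ls) 1))
      = (pvIdxs ls).map (fun k : Nat => (k : Int)) := by
    rw [hrange, List.filter_map]
    unfold pvIdxs
    congr 1
    refine List.filter_congr (fun k _ => ?_)
    show PySem.Str.startswith (PySem.List.pyGetD ls ((k : Int)) "") "rule " = pvIsRule (ls.getD k "")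
    rw [PySem.List.pyGetD_natCast]
    rfl
  rw [hfilter, PySem.List.slice_from_one, ← List.map_tail, PySem.List.len_eq,
      show ((pvIdxs ls).tail.map (fun k : Nat => (k : Int)) ++ [((ls.length : Int))])
        = ((pvIdxs ls).tail ++ [ls.length]).map (fun k : Nat => (k : Int)) by rw [List.map_append]; rfl,
      List.zip_map, List.map_map]
  unfold pvA
  refine List.map_congr_left (fun p _ => ?_)
  show PySem.Str.join "" (PySem.List.slice ls (some ((p.1 : Int))) (some ((p.2 : Int))))
      = PySem.Str.join "" ((ls.drop p.1).take (p.2 - p.1))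
  rw [PySem.List.slice_natCast]

-- ===== VERDICT (by name: the statement is the Claim_ definition above) =====
theorem split_rules_py_spec : Claim_equal_split_rules_py := by
  intro raw _
  unfold Spec_split_rules_py split_rules_py split_rules_py_alt
  rw [pvA_bridge, pvA_eq_groups, pvB_loop_none]
  rfl
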